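-- pv_equiv track=rewrite | github.com/RikaiCode/RikaiCode | analysis.py | detect_infrastructure
-- ===== SOURCE A (Python) =====
-- def detect_infrastructure(files_dict):
--     """Detects framework and infra files."""
--     detections = []
--     checks = {
--         "Docker": ["Dockerfile", "docker-compose.yml", ".dockerignore"],
--         "Kubernetes": ["k8s/", "deployment.yaml", "helm/", "Chart.yaml"],
--         "CI/CD": [".github/workflows/", ".gitlab-ci.yml", "Jenkinsfile", "azure-pipelines.yml"],
--         "Tests": ["test_", "_test.py", ".spec.js", ".test.js", "tests/"],
--         "Documentation": ["docs/", "mkdocs.yml", "sphinx/", "readthedocs.yaml"],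
--         "Config": [".env.example", "config.yaml", "settings.py"]
--     }
--
--     for tech, keys in checks.items():
--         for key in keys:
--             if any(key in f for f in files_dict):
--                 detections.append(tech)
--                 break
--     return detections
-- ===== SOURCE B (Python) =====
-- def detect_infrastructure(files_dict):
--     """Detects framework and infra files."""
--     checks = {
--         "Docker": ["Dockerfile", "docker-compose.yml", ".dockerignore"],
--         "Kubernetes": ["k8s/", "deployment.yaml", "helm/", "Chart.yaml"],
--         "CI/CD": [".github/workflows/", ".gitlab-ci.yml", "Jenkinsfile", "azure-pipelines.yml"],
--         "Tests": ["test_", "_test.py", ".spec.js", ".test.js", "tests/"],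
--         "Documentation": ["docs/", "mkdocs.yml", "sphinx/", "readthedocs.yaml"],
--         "Config": [".env.example", "config.yaml", "settings.py"]
--     }
--     patterns = [(key, tech) for tech, keys in checks.items() for key in keys]
--     detected = set()
--     for f in files_dict:
--         for key, tech in patterns:
--             if key in f:
--                 detected.add(tech)
--     return [tech for tech in checks if tech in detected]
-- ===== Notes on version B (the rewrite author's own statement) =====
-- stated objective: alternative
-- what changed: B makes a single pass over the filenames, matching each against a flattened (pattern, tech) index and collecting detected techs in a set, then emits the techs in checks order by filtering on set membership, instead of re-scanning all files once per tech key with a break.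
import Mathlib
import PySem

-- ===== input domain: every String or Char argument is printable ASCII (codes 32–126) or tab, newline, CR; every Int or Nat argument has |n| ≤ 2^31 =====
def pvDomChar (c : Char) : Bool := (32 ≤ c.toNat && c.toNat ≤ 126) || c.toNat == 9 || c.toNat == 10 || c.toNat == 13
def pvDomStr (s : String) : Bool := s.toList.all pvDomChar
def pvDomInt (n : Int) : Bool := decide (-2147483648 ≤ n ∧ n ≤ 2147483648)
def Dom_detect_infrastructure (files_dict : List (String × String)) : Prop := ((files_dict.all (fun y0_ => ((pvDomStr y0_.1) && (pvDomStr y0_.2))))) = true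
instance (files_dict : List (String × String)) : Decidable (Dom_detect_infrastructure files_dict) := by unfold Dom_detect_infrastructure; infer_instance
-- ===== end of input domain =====

-- B builds a set of detected techs in one pass over the filenames via a flattened (pattern, tech)
-- index, then filters the checks order by set membership, instead of re-scanning all files per tech.


-- the literal checks dict shared by both sources (insertion order)
def pvChecks : List (String × List String) :=
  [ ("Docker", ["Dockerfile", "docker-compose.yml", ".dockerignore"]),
    ("Kubernetes", ["k8s/", "deployment.yaml", "helm/", "Chart.yaml"]),
    ("CI/CD", [".github/workflows/", ".gitlab-ci.yml", "Jenkinsfile", "azure-pipelines.yml"]),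
    ("Tests", ["test_", "_test.py", ".spec.js", ".test.js", "tests/"]),
    ("Documentation", ["docs/", "mkdocs.yml", "sphinx/", "readthedocs.yaml"]),
    ("Config", [".env.example", "config.yaml", "settings.py"]) ]

-- ===== PORT A =====
-- the inner 'for key in keys: if any(key in f …): append; break' appends tech iff some key matches
def detect_infrastructure (files_dict : List (String × String)) : List String :=
  pvChecks.foldl
    (fun detections tk =>
      if tk.2.any (fun key => files_dict.any (fun f => PySem.Str.isIn key f.1))
      then detections ++ [tk.1] else detections)
    []

-- ===== PORT B =====
def pvPatterns : List (String × String) :=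
  pvChecks.flatMap (fun tk => tk.2.map (fun key => (key, tk.1)))

def detect_infrastructure_alt (files_dict : List (String × String)) : List String :=
  let detected : PySem.Set String :=
    files_dict.foldl
      (fun s f =>
        pvPatterns.foldl (fun s p => if PySem.Str.isIn p.1 f.1 then PySem.Set.add s p.2 else s) s)
      PySem.Set.empty
  (pvChecks.map Prod.fst).filter (fun t => PySem.Set.contains detected t)

-- ===== PRECONDITION & SPEC =====
def Spec_detect_infrastructure (files_dict : List (String × String)) (out : List String) : Prop := out = detect_infrastructure_alt files_dict
instance (files_dict : List (String × String)) (out : List String) : Decidable (Spec_detect_infrastructure files_dict out) := by unfold Spec_detect_infrastructure; infer_instance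

-- ===== CLAIM (what is proved, stated in full; the proofs are below) =====
def Claim_equal_detect_infrastructure : Prop := ∀ (files_dict : List (String × String)), Dom_detect_infrastructure files_dict → Spec_detect_infrastructure files_dict (detect_infrastructure files_dict)

-- ===== LEMMAS AND PROOFS =====

-- contains of the inner per-file pattern fold
lemma contains_inner (pats : List (String × String)) (f : String × String)
    (s : PySem.Set String) (x : String) :
    PySem.Set.contains
      (pats.foldl (fun s p => if PySem.Str.isIn p.1 f.1 then PySem.Set.add s p.2 else s) s) x
    = (PySem.Set.contains s x || pats.any (fun p => (p.2 == x) && PySem.Str.isIn p.1 f.1)) := by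
  induction pats generalizing s with
  | nil => simp
  | cons p ps ih =>
    simp only [List.foldl_cons, List.any_cons, ih]
    by_cases h : PySem.Str.isIn p.1 f.1 = true
    · simp only [h]
      rw [Bool.eq_iff_iff]
      simp [PySem.Set.mem_add, beq_iff_eq]
      tauto
    · simp only [if_neg h]
      rw [Bool.eq_iff_iff]
      simp [Bool.not_eq_true] at h
      simp [h]

-- contains of the whole detected set
lemma contains_detected (files_dict : List (String × String))
    (s : PySem.Set String) (x : String) :
    PySem.Set.contains
      (files_dict.foldl
        (fun s f =>
          pvPatterns.foldl (fun s p => if PySem.Str.isIn p.1 f.1 then PySem.Set.add s p.2 else s) s)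
        s) x
    = (PySem.Set.contains s x ||
        files_dict.any (fun f => pvPatterns.any (fun p => (p.2 == x) && PySem.Str.isIn p.1 f.1))) := by
  induction files_dict generalizing s with
  | nil => simp
  | cons f fs ih =>
    simp only [List.foldl_cons, List.any_cons, ih, contains_inner, Bool.or_assoc]

-- swap the two ∃-scans: any over files of an or = or of anys
lemma any_or {α : Type} (xs : List α) (p q : α → Bool) :
    xs.any (fun x => p x || q x) = (xs.any p || xs.any q) := by
  induction xs with
  | nil => rfl
  | cons x xs ih =>
    simp only [List.any_cons, ih]
    ac_rfl

-- generic shape: the foldl-append-if over checks equals the filter of the tech names,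
-- given that the per-tech conditions agree
lemma gen_fold (cs : List (String × List String)) (cond : String → Bool)
    (condA : String × List String → Bool) (acc : List String)
    (h : ∀ tk ∈ cs, condA tk = cond tk.1) :
    cs.foldl (fun d tk => if condA tk then d ++ [tk.1] else d) acc
    = acc ++ (cs.map Prod.fst).filter cond := by
  induction cs generalizing acc with
  | nil => simp
  | cons tk cs ih =>
    simp only [List.foldl_cons, List.map_cons, List.filter_cons,
      h tk (List.mem_cons_self), ih _ (fun t ht => h t (List.mem_cons_of_mem _ ht))]
    by_cases hc : cond tk.1 = true
    · simp [hc]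
    · simp [Bool.not_eq_true] at hc
      simp [hc]

-- per-tech: membership in the detected set agrees with A's nested-any condition
lemma cond_eq (files_dict : List (String × String)) :
    ∀ tk ∈ pvChecks,
      (tk.2.any (fun key => files_dict.any (fun f => PySem.Str.isIn key f.1)))
      = files_dict.any (fun f => pvPatterns.any (fun p => (p.2 == tk.1) && PySem.Str.isIn p.1 f.1)) := by
  intro tk htk
  fin_cases htk <;> simp [pvPatterns, pvChecks, any_or]

-- ===== VERDICT (by name: the statement is the Claim_ definition above) =====
theorem detect_infrastructure_spec : Claim_equal_detect_infrastructure := by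
  intro files_dict _
  show _ = _
  unfold detect_infrastructure detect_infrastructure_alt
  simp only []
  rw [gen_fold pvChecks
      (fun t => PySem.Set.contains
        (files_dict.foldl
          (fun s f =>
            pvPatterns.foldl (fun s p => if PySem.Str.isIn p.1 f.1 then PySem.Set.add s p.2 else s) s)
          PySem.Set.empty) t)
      _ []
      (by
        intro tk htk
        beta_reduce
        rw [contains_detected, cond_eq files_dict tk htk]
        simp [PySem.Set.empty])]
  simp
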